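-- pv_equiv track=rewrite | github.com/caval-project/caval-corpus | scripts/prioel2conllu/stages/07_handle_question_presentation_after.py | insert_q_after_last_vowel
-- ===== SOURCE A (Python) =====
-- VOWELS = "aoeēiǝ"
--
-- def insert_q_after_last_vowel(text: str) -> str:
--     """
--     Insert '?' immediately after the right-most vowel in `text`.
--     If no vowel exists, append '?' at the end.
--     """
--     last_vowel_pos = -1
--     for i in range(len(text) - 1, -1, -1):
--         if text[i] in VOWELS:
--             last_vowel_pos = i
--             break
--     if last_vowel_pos == -1:
--         return text + "?"
--     return text[: last_vowel_pos + 1] + "?" + text[last_vowel_pos + 1 :]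
-- ===== SOURCE B (Python) =====
-- VOWELS = "aoeēiǝ"
--
--
-- def insert_q_after_last_vowel(text: str) -> str:
--     """Reverse the string, split at the first vowel, insert '?' there, reverse back."""
--     rev = text[::-1]
--     for j, c in enumerate(rev):
--         if c in VOWELS:
--             return (rev[:j] + "?" + rev[j:])[::-1]
--     return text + "?"
-- ===== Notes on version B (the rewrite author's own statement) =====
-- stated objective: alternative
-- what changed: B reverses the string, splits it at the first vowel of the reversal (inserting '?' there) and reverses back, instead of A's backward index loop with a -1 sentinel and positional slicing of the original string.
import Mathlib
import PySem

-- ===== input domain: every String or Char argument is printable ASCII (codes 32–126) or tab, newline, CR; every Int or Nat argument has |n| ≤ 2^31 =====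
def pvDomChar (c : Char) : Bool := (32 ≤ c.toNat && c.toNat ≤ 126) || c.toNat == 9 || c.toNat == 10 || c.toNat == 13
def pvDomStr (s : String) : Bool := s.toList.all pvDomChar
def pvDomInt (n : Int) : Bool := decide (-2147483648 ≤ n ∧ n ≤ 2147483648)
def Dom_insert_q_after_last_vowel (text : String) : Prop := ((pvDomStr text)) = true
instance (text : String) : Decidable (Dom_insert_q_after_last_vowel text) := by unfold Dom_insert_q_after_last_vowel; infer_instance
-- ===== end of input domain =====

-- B splits the reversed string at its first vowel instead of scanning indices backward; alternative decomposition, same cost.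

-- ===== PORT A =====
-- VOWELS = "aoeēiǝ"
def pvVowels : List Char := ['a', 'o', 'e', 'ē', 'i', 'ǝ']

-- the 'for i in range(len(text)-1, -1, -1)' loop with break: first index (from the list) whose char is a vowel, else -1
def pvFindLoop : List Int → List Char → Int
  | [], _ => -1
  | i :: is, cs =>
      if PySem.List.pyGetD cs i 'a' ∈ pvVowels then i else pvFindLoop is cs

def insert_q_after_last_vowel (text : String) : String :=
  let cs := text.toList
  let p := pvFindLoop (PySem.List.pyRange (PySem.List.len cs - 1) (-1) (-1)) cs
  if p = -1 then String.ofList (cs ++ ['?'])      -- text + "?"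
  else String.ofList (PySem.List.slice cs none (some (p + 1)) ++ '?' :: PySem.List.slice cs (some (p + 1)) none)
        -- text[: p+1] + "?" + text[p+1 :]

-- ===== PORT B =====
-- B's loop: enumerate over rev; at the first vowel (index j) return (rev[:j] + "?" + rev[j:])[::-1]
def pvAltScan (full : List Char) (j : Nat) : List Char → Option (List Char)
  | [] => none
  | c :: rest =>
      if c ∈ pvVowels then some ((full.take j ++ '?' :: full.drop j).reverse)
      else pvAltScan full (j + 1) rest

def insert_q_after_last_vowel_alt (text : String) : String :=
  let rev := text.toList.reverse               -- text[::-1]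
  match pvAltScan rev 0 rev with
  | some l => String.ofList l
  | none => String.ofList (text.toList ++ ['?'])   -- text + "?"

-- ===== PRECONDITION & SPEC =====
def Spec_insert_q_after_last_vowel (text : String) (out : String) : Prop := out = insert_q_after_last_vowel_alt text
instance (text : String) (out : String) : Decidable (Spec_insert_q_after_last_vowel text out) := by unfold Spec_insert_q_after_last_vowel; infer_instance

-- ===== CLAIM (what is proved, stated in full; the proofs are below) =====
def Claim_equal_insert_q_after_last_vowel : Prop := ∀ (text : String), Dom_insert_q_after_last_vowel text → Spec_insert_q_after_last_vowel text (insert_q_after_last_vowel text)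

-- ===== LEMMAS AND PROOFS =====

-- B's scan, characterised by findIdx? on the remaining suffix
theorem pvAltScan_eq (full : List Char) (j : Nat) (rest : List Char) :
    pvAltScan full j rest =
      (rest.findIdx? (· ∈ pvVowels)).map
        (fun k => (full.take (j + k) ++ '?' :: full.drop (j + k)).reverse) := by
  induction rest generalizing j with
  | nil => simp [pvAltScan]
  | cons c rest ih =>
      by_cases h : c ∈ pvVowels
      · simp [pvAltScan, List.findIdx?_cons, h]
      · simp only [pvAltScan, List.findIdx?_cons, decide_eq_true_eq, h, if_false, ih (j + 1), Option.map_map]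
        cases rest.findIdx? (· ∈ pvVowels) with
        | none => rfl
        | some k => simp [Nat.add_assoc, Nat.add_comm 1 k]

-- A's backward index loop over the first m characters, characterised by findIdx? on the reversed prefix
theorem pvFindLoop_eq (cs : List Char) (m : Nat) (hm : m ≤ cs.length) :
    pvFindLoop (PySem.List.pyRange ((m : Int) - 1) (-1) (-1)) cs =
      match ((cs.take m).reverse.findIdx? (· ∈ pvVowels)) with
      | none => -1
      | some k => (m : Int) - 1 - (k : Int) := by
  induction m with
  | zero => rw [PySem.List.pyRange_neg_one_eq_nil (by norm_num)]; simp [pvFindLoop]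
  | succ m ih =>
      have hm' : m ≤ cs.length := Nat.le_of_succ_le hm
      have hlt : m < cs.length := hm
      rw [show ((m + 1 : Nat) : Int) - 1 = (m : Int) by push_cast; ring,
        PySem.List.pyRange_neg_one_cons (by omega)]
      have htake : (cs.take (m + 1)).reverse = cs[m] :: (cs.take m).reverse := by
        rw [List.take_add_one, List.getElem?_eq_getElem hlt]; simp
      rw [htake]
      simp only [pvFindLoop, PySem.List.pyGetD_natCast, List.getD_eq_getElem?_getD,
        List.getElem?_eq_getElem hlt, Option.getD_some, List.findIdx?_cons]
      by_cases h : cs[m] ∈ pvVowels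
      · simp [h]
      · simp only [h, if_false, decide_eq_true_eq, ih hm']
        cases ((cs.take m).reverse.findIdx? (· ∈ pvVowels)) with
        | none => rfl
        | some k => simp only [Option.map_some]; push_cast; ring

theorem pv_main (text : String) :
    insert_q_after_last_vowel text = insert_q_after_last_vowel_alt text := by
  have hA := pvFindLoop_eq text.toList text.toList.length le_rfl
  rw [List.take_length] at hA
  simp only [insert_q_after_last_vowel, insert_q_after_last_vowel_alt, PySem.List.len_eq,
    pvAltScan_eq, hA]
  set cs := text.toList with hcs
  cases hfi : cs.reverse.findIdx? (fun x => decide (x ∈ pvVowels)) with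
  | none => simp
  | some k =>
      have hk : k < cs.length := by
        have := List.findIdx?_eq_some_iff_findIdx_eq.mp hfi
        simpa using this.1
      have hne : (cs.length : Int) - 1 - (k : Int) ≠ -1 := by omega
      simp only [hne, if_false, Option.map_some, Nat.zero_add]
      have hp1 : (cs.length : Int) - 1 - (k : Int) + 1 = ((cs.length - k : Nat) : Int) := by
        push_cast [Nat.cast_sub hk.le]; ring
      rw [hp1, PySem.List.slice_to_natCast, PySem.List.slice_from_natCast]
      congr 1
      rw [List.take_reverse, List.drop_reverse]
      simp

-- ===== VERDICT (by name: the statement is the Claim_ definition above) =====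
theorem insert_q_after_last_vowel_spec : Claim_equal_insert_q_after_last_vowel := by
  intro text _
  exact pv_main text
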